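-- pv_equiv track=rewrite | github.com/cjschultz87/math | blocks.py | btd
-- ===== SOURCE A (Python) =====
-- def btd(b,base):
--     if len(b) > 0:
--         for b_element in b:
--             if len(b_element) > 0:
--                 for digit in b_element:
--                     if type(digit) ==  type(5):
--                         pass
--                     else:
--                         return []
--             else:
--                 return []
--     else:
--         return []
--
--     bravo = []
--     for b_element in b:
--         d = 0
--         for i,digit in enumerate(b_element):
--             d += digit * pow(base,i)
--         bravo.append(d)
--     return bravo
-- ===== SOURCE B (Python) =====
-- def btd(b, base):
--     if not b or any((not e) or any(type(d) is not int for d in e) for e in b):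
--         return []
--     out = []
--     for e in b:
--         d = 0
--         for digit in reversed(e):
--             d = d * base + digit
--         out.append(d)
--     return out
-- ===== Notes on version B (the rewrite author's own statement) =====
-- stated objective: faster
-- what changed: Each block is evaluated by Horner's rule over the reversed digit list (d = d*base + digit) instead of recomputing pow(base, i) for every digit position.
import Mathlib
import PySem

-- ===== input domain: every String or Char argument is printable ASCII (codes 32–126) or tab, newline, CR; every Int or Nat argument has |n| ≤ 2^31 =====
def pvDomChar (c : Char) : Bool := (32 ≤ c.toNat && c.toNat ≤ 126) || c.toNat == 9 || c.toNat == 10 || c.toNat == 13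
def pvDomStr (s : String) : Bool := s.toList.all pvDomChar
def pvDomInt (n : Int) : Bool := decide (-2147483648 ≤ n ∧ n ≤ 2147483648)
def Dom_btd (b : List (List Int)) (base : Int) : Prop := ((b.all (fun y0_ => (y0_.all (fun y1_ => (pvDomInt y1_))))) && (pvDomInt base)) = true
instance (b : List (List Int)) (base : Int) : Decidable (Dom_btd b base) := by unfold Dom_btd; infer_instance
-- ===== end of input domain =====

-- B replaces A's per-digit pow(base, i) with Horner's rule over the reversed digits (faster: one multiplication per digit).
-- In Lean every digit is an Int, so A's `type(digit) == type(5)` test always passes; both ports are exact on the typed domain.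

-- ===== PORT A =====
-- A's validation loop: returns false as soon as an empty block is met (the inner
-- digit type-check loop always passes on Int digits).
def btdValidate : List (List Int) → Bool
  | [] => true
  | e :: rest => if e.length > 0 then btdValidate rest else false

-- A's inner loop: d += digit * pow(base, i) over enumerate(b_element)
def btdRow (base : Int) (e : List Int) : Int :=
  (PySem.List.enumerate e 0).foldl (fun d p => d + p.2 * base ^ p.1.toNat) 0

def btd (b : List (List Int)) (base : Int) : List Int :=
  if b.length > 0 then
    if btdValidate b then
      b.foldl (fun bravo e => bravo ++ [btdRow base e]) []
    else []
  else []

-- ===== PORT B =====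
def btd_alt (b : List (List Int)) (base : Int) : List Int :=
  if b.isEmpty || b.any (fun e => e.isEmpty) then []
  else b.map (fun e => e.reverse.foldl (fun d digit => d * base + digit) 0)

-- ===== PRECONDITION & SPEC =====
def Spec_btd (b : List (List Int)) (base : Int) (out : List Int) : Prop := out = btd_alt b base
instance (b : List (List Int)) (base : Int) (out : List Int) : Decidable (Spec_btd b base out) := by unfold Spec_btd; infer_instance

-- ===== CLAIM (what is proved, stated in full; the proofs are below) =====
def Claim_equal_btd : Prop := ∀ (b : List (List Int)) (base : Int), Dom_btd b base → Spec_btd b base (btd b base)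

-- ===== LEMMAS AND PROOFS =====

theorem btdValidate_eq (l : List (List Int)) :
    btdValidate l = l.all (fun e => !e.isEmpty) := by
  induction l with
  | nil => rfl
  | cons e rest ih =>
    simp only [btdValidate, List.all_cons, ih]
    cases e <;> simp

theorem enum_foldl_eq (base : Int) (e : List Int) : ∀ (s : Nat) (a : Int),
    (PySem.List.enumerate e (s : Int)).foldl (fun d p => d + p.2 * base ^ p.1.toNat) a
      = a + base ^ s * e.foldr (fun x acc => acc * base + x) 0 := by
  induction e with
  | nil => intro s a; simp [PySem.List.enumerate_nil]
  | cons x xs ih =>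
    intro s a
    rw [PySem.List.enumerate_cons, List.foldl_cons]
    have h1 : ((s : Int) + 1) = ((s + 1 : Nat) : Int) := by push_cast; ring
    rw [h1, ih (s + 1)]
    simp only [Int.toNat_natCast, List.foldr_cons]
    ring

theorem row_eq (base : Int) (e : List Int) :
    btdRow base e = e.reverse.foldl (fun d digit => d * base + digit) 0 := by
  rw [btdRow, List.foldl_reverse]
  have := enum_foldl_eq base e 0 0
  norm_num at this
  exact this

theorem foldl_append_map (base : Int) (l : List (List Int)) : ∀ (acc : List Int),
    l.foldl (fun bravo e => bravo ++ [btdRow base e]) acc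
      = acc ++ l.map (fun e => e.reverse.foldl (fun d digit => d * base + digit) 0) := by
  induction l with
  | nil => intro acc; simp
  | cons e rest ih =>
    intro acc
    rw [List.foldl_cons, ih, row_eq]; simp

-- ===== VERDICT (by name: the statement is the Claim_ definition above) =====
theorem btd_spec : Claim_equal_btd := by
  intro b base _
  unfold Spec_btd btd btd_alt
  cases b with
  | nil => simp
  | cons e rest =>
    simp only [List.length_cons, List.isEmpty_cons, Bool.false_or]
    rw [btdValidate_eq]
    by_cases h : ((e :: rest).any fun x => x.isEmpty) = true
    · have : ¬ ((e :: rest).all (fun x => !x.isEmpty)) = true := by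
        simp only [List.all_eq_not_any_not]; simp [h]
      simp [h, this]
    · have : ((e :: rest).all (fun x => !x.isEmpty)) = true := by
        simp only [List.all_eq_not_any_not]; simp at h ⊢
        exact ⟨h.1, fun x hx hc => h.2 (hc ▸ hx)⟩
      simp only [h, this, if_true, if_pos (Nat.succ_pos _)]
      rw [foldl_append_map]
      simp
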